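-- pv_equiv track=rewrite | github.com/spineight/algorithmsAndDataStructures | ITMO/KT/practice/hazzus/ml-master/cf/N-dist.py | ex_dist
-- ===== SOURCE A (Python) =====
-- def ex_dist(data):
-- 	distance = 0
-- 	prefixes = {}
-- 	suffixes = {}
-- 	data.sort()
--
-- 	prefix_total = 0
-- 	suffix_total = 0
-- 	for x, c in data:
-- 		if c not in suffixes:
-- 			suffixes[c] = (0, 0)
-- 			prefixes[c] = (0, 0)
-- 		suffixes[c] = (suffixes[c][0] + x, suffixes[c][1] + 1)
-- 		suffix_total += x
--
-- 	for i in range(len(data)):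
-- 		x, c = data[i]
--
-- 		suffix_total -= x
-- 		suffixes[c] = (suffixes[c][0] - x, suffixes[c][1] - 1)
--
-- 		suf_sum, suf_cnt = suffixes[c]
-- 		pre_sum, pre_cnt = prefixes[c]
--
-- 		pd = (i - pre_cnt) * x - (prefix_total - pre_sum)
-- 		sd = (suffix_total - suf_sum) - ((len(data) - i - 1) - suf_cnt) * x;
--
-- 		distance += pd + sd
--
-- 		prefixes[c] = (prefixes[c][0] + x, prefixes[c][1] + 1)
-- 		prefix_total += x
--
-- 	return distance
-- ===== SOURCE B (Python) =====
-- def ex_dist(data):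
-- 	data.sort()
-- 	return sum(abs(x - y) for x, c in data for y, d in data if c != d)
-- ===== Notes on version B (the rewrite author's own statement) =====
-- stated objective: simpler
-- what changed: Replaces the incremental prefix/suffix-dictionary pass with a direct all-ordered-pairs sum of abs(x-y) over cross-class pairs (each unordered pair counted twice, matching A's doubled total); keeps data.sort() for the in-place mutation side effect.
import Mathlib
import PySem

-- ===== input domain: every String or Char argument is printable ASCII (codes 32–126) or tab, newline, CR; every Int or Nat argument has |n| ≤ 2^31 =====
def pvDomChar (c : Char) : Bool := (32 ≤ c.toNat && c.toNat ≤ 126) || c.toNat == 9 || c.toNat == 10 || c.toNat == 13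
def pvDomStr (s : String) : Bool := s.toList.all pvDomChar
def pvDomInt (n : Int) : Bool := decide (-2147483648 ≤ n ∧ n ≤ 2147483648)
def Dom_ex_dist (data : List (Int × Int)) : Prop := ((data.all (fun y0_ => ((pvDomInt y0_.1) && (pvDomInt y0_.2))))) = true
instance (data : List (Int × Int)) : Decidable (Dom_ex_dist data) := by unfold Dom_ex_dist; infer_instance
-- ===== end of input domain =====

-- B replaces A's incremental prefix/suffix-dictionary pass with a direct all-ordered-pairs
-- sum of |x - y| over cross-class pairs (objective: simpler). Both A and B sort `data` in
-- place (data.sort()); the equivalence proved here is about the RETURN value only.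

-- ===== PORT A =====
def ex_dist (data : List (Int × Int)) : Int :=
  -- data.sort(): Python sorts the pairs lexicographically
  let s := PySem.List.sorted2 data Prod.fst Prod.snd
  -- first loop: build suffixes/prefixes dicts and suffix_total
  let st1 :=
    s.foldl
      (fun (st : PySem.Dict Int (Int × Int) × PySem.Dict Int (Int × Int) × Int) a =>
        let x := a.1
        let c := a.2
        -- if c not in suffixes: suffixes[c] = (0, 0); prefixes[c] = (0, 0)
        let sp := if st.1.contains c then (st.1, st.2.1)
                  else (st.1.insert c (0, 0), st.2.1.insert c (0, 0))
        -- suffixes[c] = (suffixes[c][0] + x, suffixes[c][1] + 1)  (key always present here)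
        let v := sp.1.getD c (0, 0)
        (sp.1.insert c (v.1 + x, v.2 + 1), sp.2, st.2.2 + x))
      (PySem.Dict.empty, PySem.Dict.empty, 0)
  -- second loop: for i in range(len(data))
  let st2 :=
    (PySem.List.pyRange 0 (PySem.List.len s)).foldl
      (fun (st : Int × PySem.Dict Int (Int × Int) × PySem.Dict Int (Int × Int) × Int × Int) i =>
        let a := PySem.List.pyGetD s i (0, 0)   -- data[i]; i is always in range
        let x := a.1
        let c := a.2
        let stot := st.2.2.2.2 - x
        let suf := st.2.2.1.insert c ((st.2.2.1.getD c (0, 0)).1 - x, (st.2.2.1.getD c (0, 0)).2 - 1)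
        let sv := suf.getD c (0, 0)
        let pv := st.2.1.getD c (0, 0)
        let pd := (i - pv.2) * x - (st.2.2.2.1 - pv.1)
        let sd := (stot - sv.1) - ((PySem.List.len s - i - 1) - sv.2) * x
        let pre := st.2.1.insert c ((st.2.1.getD c (0, 0)).1 + x, (st.2.1.getD c (0, 0)).2 + 1)
        (st.1 + pd + sd, pre, suf, st.2.2.2.1 + x, stot))
      (0, st1.2.1, st1.1, 0, st1.2.2)
  st2.1

-- ===== PORT B =====
def ex_dist_alt (data : List (Int × Int)) : Int :=
  -- data.sort()
  let s := PySem.List.sorted2 data Prod.fst Prod.snd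
  -- sum(abs(x - y) for x, c in data for y, d in data if c != d)
  (s.flatMap (fun a => (s.filter (fun b => a.2 != b.2)).map (fun b => |a.1 - b.1|))).sum

-- ===== PRECONDITION & SPEC =====
def Spec_ex_dist (data : List (Int × Int)) (out : Int) : Prop := out = ex_dist_alt data
instance (data : List (Int × Int)) (out : Int) : Decidable (Spec_ex_dist data out) := by unfold Spec_ex_dist; infer_instance

-- ===== CLAIM (what is proved, stated in full; the proofs are below) =====
def Claim_equal_ex_dist : Prop := ∀ (data : List (Int × Int)), Dom_ex_dist data → Spec_ex_dist data (ex_dist data)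

-- ===== LEMMAS AND PROOFS =====

-- class-restricted sums/counts and the per-position contributions of A's second loop
def pvSumC (l : List (Int × Int)) (c : Int) : Int := ((l.filter (fun b => b.2 == c)).map Prod.fst).sum
def pvCntC (l : List (Int × Int)) (c : Int) : Int := ((l.filter (fun b => b.2 == c)).length : Int)
def pvSumX (l : List (Int × Int)) : Int := (l.map Prod.fst).sum

-- body of A's first loop, as a named function (definitionally the port's lambda)
def pvBody1 (st : PySem.Dict Int (Int × Int) × PySem.Dict Int (Int × Int) × Int) (a : Int × Int) :
    PySem.Dict Int (Int × Int) × PySem.Dict Int (Int × Int) × Int :=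
  let x := a.1
  let c := a.2
  let sp := if st.1.contains c then (st.1, st.2.1)
            else (st.1.insert c (0, 0), st.2.1.insert c (0, 0))
  let v := sp.1.getD c (0, 0)
  (sp.1.insert c (v.1 + x, v.2 + 1), sp.2, st.2.2 + x)

-- body of A's second loop, over an (index, element) pair
def pvBody2 (n : Int)
    (st : Int × PySem.Dict Int (Int × Int) × PySem.Dict Int (Int × Int) × Int × Int)
    (pa : Int × (Int × Int)) :
    Int × PySem.Dict Int (Int × Int) × PySem.Dict Int (Int × Int) × Int × Int :=
  let i := pa.1
  let x := pa.2.1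
  let c := pa.2.2
  let stot := st.2.2.2.2 - x
  let suf := st.2.2.1.insert c ((st.2.2.1.getD c (0, 0)).1 - x, (st.2.2.1.getD c (0, 0)).2 - 1)
  let sv := suf.getD c (0, 0)
  let pv := st.2.1.getD c (0, 0)
  let pd := (i - pv.2) * x - (st.2.2.2.1 - pv.1)
  let sd := (stot - sv.1) - ((n - i - 1) - sv.2) * x
  let pre := st.2.1.insert c ((st.2.1.getD c (0, 0)).1 + x, (st.2.1.getD c (0, 0)).2 + 1)
  (st.1 + pd + sd, pre, suf, st.2.2.2.1 + x, stot)

-- per-position prefix/suffix contributions, and their telescoped total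
def pvPd (p : List (Int × Int)) (a : Int × Int) : Int :=
  ((p.filter (fun b => a.2 != b.2)).map (fun b => a.1 - b.1)).sum
def pvSd (a : Int × Int) (t : List (Int × Int)) : Int :=
  ((t.filter (fun b => a.2 != b.2)).map (fun b => b.1 - a.1)).sum
def pvTotal : List (Int × Int) → List (Int × Int) → Int
  | _, [] => 0
  | p, a :: t => pvPd p a + pvSd a t + pvTotal (p ++ [a]) t

-- B's inner comprehension, and its double sum with an explicit outer list
def pvInner (a : Int × Int) (l : List (Int × Int)) : Int :=
  ((l.filter (fun b => a.2 != b.2)).map (fun b => |a.1 - b.1|)).sum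
def pvBsum2 (outer l : List (Int × Int)) : Int := (outer.map (fun a => pvInner a l)).sum

theorem pv_sum_map_ite_filter (l : List (Int × Int)) (q : Int × Int → Bool) (f : Int × Int → Int) :
    (l.map (fun x => if q x then f x else 0)).sum = ((l.filter q).map f).sum := by
  induction l with
  | nil => simp
  | cons a t ih =>
    by_cases h : q a = true <;> simp [h, ih]

theorem pv_sum_flatMap (l : List (Int × Int)) (g : Int × Int → List Int) :
    (l.flatMap g).sum = (l.map (fun a => (g a).sum)).sum := by
  induction l with
  | nil => simp
  | cons a t ih => simp [List.flatMap_cons, ih]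

theorem pv_sumC_cons (a : Int × Int) (l : List (Int × Int)) (c : Int) :
    pvSumC (a :: l) c = (if a.2 = c then a.1 else 0) + pvSumC l c := by
  by_cases h : a.2 = c <;> simp [pvSumC, h]

theorem pv_cntC_cons (a : Int × Int) (l : List (Int × Int)) (c : Int) :
    pvCntC (a :: l) c = (if a.2 = c then 1 else 0) + pvCntC l c := by
  by_cases h : a.2 = c
  · simp [pvCntC, h]
    ring
  · simp [pvCntC, h]

theorem pv_sumC_append (p q : List (Int × Int)) (c : Int) :
    pvSumC (p ++ q) c = pvSumC p c + pvSumC q c := by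
  simp [pvSumC, List.filter_append]

theorem pv_cntC_append (p q : List (Int × Int)) (c : Int) :
    pvCntC (p ++ q) c = pvCntC p c + pvCntC q c := by
  simp [pvCntC, List.filter_append]

-- closed forms for pvPd / pvSd (what A's arithmetic computes from the dictionaries)
theorem pv_pd_eq (p : List (Int × Int)) (a : Int × Int) :
    pvPd p a = ((p.length : Int) - pvCntC p a.2) * a.1 - (pvSumX p - pvSumC p a.2) := by
  induction p with
  | nil => simp [pvPd, pvCntC, pvSumX, pvSumC]
  | cons b t ih =>
    by_cases h : b.2 = a.2
    · simp [pvPd, pvCntC, pvSumX, pvSumC, h] at *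
      linarith [ih]
    · simp [pvPd, pvCntC, pvSumX, pvSumC, h, Ne.symm h] at *
      linarith [ih]

theorem pv_sd_eq (t : List (Int × Int)) (a : Int × Int) :
    pvSd a t = (pvSumX t - pvSumC t a.2) - ((t.length : Int) - pvCntC t a.2) * a.1 := by
  induction t with
  | nil => simp [pvSd, pvCntC, pvSumX, pvSumC]
  | cons b t ih =>
    by_cases h : b.2 = a.2
    · simp [pvSd, pvCntC, pvSumX, pvSumC, h] at *
      linarith [ih]
    · simp [pvSd, pvCntC, pvSumX, pvSumC, h, Ne.symm h] at *
      linarith [ih]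

-- ---- first-loop invariant ----
theorem pv_loop1 (l : List (Int × Int)) (suf pre : PySem.Dict Int (Int × Int)) (stot : Int)
    (hp : ∀ c, pre.getD c (0, 0) = (0, 0)) :
    (∀ c, (l.foldl pvBody1 (suf, pre, stot)).1.getD c (0, 0)
        = ((suf.getD c (0, 0)).1 + pvSumC l c, (suf.getD c (0, 0)).2 + pvCntC l c)) ∧
    (∀ c, (l.foldl pvBody1 (suf, pre, stot)).2.1.getD c (0, 0) = (0, 0)) ∧
    (l.foldl pvBody1 (suf, pre, stot)).2.2 = stot + pvSumX l := by
  induction l generalizing suf pre stot with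
  | nil => exact ⟨fun c => by simp [pvSumC, pvCntC], hp, by simp [pvSumX]⟩
  | cons a t ih =>
    simp only [List.foldl_cons]
    have hstep : pvBody1 (suf, pre, stot) a
        = ((if suf.contains a.2 then suf else suf.insert a.2 (0,0)).insert a.2
            (((if suf.contains a.2 then suf else suf.insert a.2 (0,0)).getD a.2 (0,0)).1 + a.1,
             ((if suf.contains a.2 then suf else suf.insert a.2 (0,0)).getD a.2 (0,0)).2 + 1),
           (if suf.contains a.2 then pre else pre.insert a.2 (0,0)), stot + a.1) := by
      by_cases h : suf.contains a.2 = true <;> simp [pvBody1, h]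
    rw [hstep]
    set suf1 := if suf.contains a.2 then suf else suf.insert a.2 (0,0) with hsuf1
    have hsuf1getD : ∀ c, suf1.getD c (0, 0) = suf.getD c (0, 0) := by
      intro c
      rw [hsuf1]
      by_cases h : suf.contains a.2 = true
      · rw [if_pos h]
      · rw [if_neg h, PySem.Dict.getD_insert]
        by_cases hc : c = a.2
        · rw [if_pos hc, hc, PySem.Dict.getD_of_not_contains _ _ (by simpa using h)]
        · rw [if_neg hc]
    set pre1 := if suf.contains a.2 then pre else pre.insert a.2 (0,0) with hpre1
    have hpre1getD : ∀ c, pre1.getD c (0, 0) = (0, 0) := by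
      intro c
      rw [hpre1]
      by_cases h : suf.contains a.2 = true
      · rw [if_pos h]; exact hp c
      · rw [if_neg h, PySem.Dict.getD_insert]
        by_cases hc : c = a.2
        · rw [if_pos hc]
        · rw [if_neg hc]; exact hp c
    set suf2 := suf1.insert a.2 ((suf1.getD a.2 (0,0)).1 + a.1, (suf1.getD a.2 (0,0)).2 + 1) with hsuf2
    obtain ⟨ih1, ih2, ih3⟩ := ih suf2 pre1 (stot + a.1) hpre1getD
    refine ⟨?_, ih2, ?_⟩
    · intro c
      rw [ih1 c]
      have hsuf2getD : suf2.getD c (0, 0)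
          = ((suf.getD c (0,0)).1 + (if a.2 = c then a.1 else 0),
             (suf.getD c (0,0)).2 + (if a.2 = c then 1 else 0)) := by
        rw [hsuf2, PySem.Dict.getD_insert]
        by_cases hc : c = a.2
        · rw [if_pos hc, hc, hsuf1getD a.2, if_pos rfl, if_pos rfl]
        · rw [if_neg hc, hsuf1getD c, if_neg (fun h => hc h.symm), if_neg (fun h => hc h.symm)]
          simp
      rw [hsuf2getD, pv_sumC_cons, pv_cntC_cons]
      simp only [Prod.mk.injEq]
      constructor <;> ring
    · rw [ih3]
      simp [pvSumX]
      ring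

-- ---- second-loop invariant ----
theorem pv_loop2 (n : Int) (l p : List (Int × Int)) (dist : Int)
    (pre suf : PySem.Dict Int (Int × Int))
    (hpre : ∀ c, pre.getD c (0, 0) = (pvSumC p c, pvCntC p c))
    (hsuf : ∀ c, suf.getD c (0, 0) = (pvSumC l c, pvCntC l c))
    (hn : n = (p.length : Int) + l.length) :
    ((PySem.List.enumerate l (p.length : Int)).foldl (pvBody2 n) (dist, pre, suf, pvSumX p, pvSumX l)).1
      = dist + pvTotal p l := by
  induction l generalizing p dist pre suf with
  | nil => simp [pvTotal]
  | cons a t ih =>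
    rw [PySem.List.enumerate_cons, List.foldl_cons]
    have hstep : pvBody2 n (dist, pre, suf, pvSumX p, pvSumX (a :: t)) ((p.length : Int), a)
        = (dist + pvPd p a + pvSd a t,
           pre.insert a.2 ((pre.getD a.2 (0,0)).1 + a.1, (pre.getD a.2 (0,0)).2 + 1),
           suf.insert a.2 ((suf.getD a.2 (0,0)).1 - a.1, (suf.getD a.2 (0,0)).2 - 1),
           pvSumX p + a.1, pvSumX (a :: t) - a.1) := by
      simp only [pvBody2]
      have h1 : (suf.insert a.2 ((suf.getD a.2 (0,0)).1 - a.1, (suf.getD a.2 (0,0)).2 - 1)).getD a.2 (0,0)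
          = (pvSumC t a.2, pvCntC t a.2) := by
        rw [PySem.Dict.getD_insert, if_pos rfl, hsuf a.2, pv_sumC_cons, pv_cntC_cons]
        simp
      rw [h1, hpre a.2]
      simp only [Prod.mk.injEq]
      refine ⟨?_, trivial⟩
      rw [pv_pd_eq, pv_sd_eq]
      have hx : pvSumX (a :: t) - a.1 = pvSumX t := by simp [pvSumX]
      have hlen : n - (p.length : Int) - 1 = (t.length : Int) := by
        simp at hn; omega
      rw [hx, hlen]
    rw [hstep]
    have hpre' : ∀ c, (pre.insert a.2 ((pre.getD a.2 (0,0)).1 + a.1, (pre.getD a.2 (0,0)).2 + 1)).getD c (0,0)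
        = (pvSumC (p ++ [a]) c, pvCntC (p ++ [a]) c) := by
      intro c
      rw [PySem.Dict.getD_insert, pv_sumC_append, pv_cntC_append]
      by_cases hc : c = a.2
      · rw [if_pos hc, hc, hpre a.2, pv_sumC_cons, pv_cntC_cons]
        simp [pvSumC, pvCntC]
      · rw [if_neg hc, hpre c, pv_sumC_cons, pv_cntC_cons]
        have : ¬ a.2 = c := fun h => hc h.symm
        simp [pvSumC, pvCntC, this]
    have hsuf' : ∀ c, (suf.insert a.2 ((suf.getD a.2 (0,0)).1 - a.1, (suf.getD a.2 (0,0)).2 - 1)).getD c (0,0)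
        = (pvSumC t c, pvCntC t c) := by
      intro c
      rw [PySem.Dict.getD_insert]
      by_cases hc : c = a.2
      · rw [if_pos hc, hc, hsuf a.2, pv_sumC_cons, pv_cntC_cons]
        simp
      · rw [if_neg hc, hsuf c, pv_sumC_cons, pv_cntC_cons]
        have : ¬ a.2 = c := fun h => hc h.symm
        simp [this]
    have hx : pvSumX (a :: t) - a.1 = pvSumX t := by simp [pvSumX]
    have hxp : pvSumX p + a.1 = pvSumX (p ++ [a]) := by simp [pvSumX]
    have hlen' : (p.length : Int) + 1 = (((p ++ [a]).length : Nat) : Int) := by simp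
    have hn' : n = (((p ++ [a]).length : Nat) : Int) + (t.length : Int) := by
      simp at hn ⊢; omega
    rw [hx, hxp, hlen']
    rw [ih (p ++ [a]) (dist + pvPd p a + pvSd a t) _ _ hpre' hsuf' hn']
    show dist + pvPd p a + pvSd a t + pvTotal (p ++ [a]) t = dist + pvTotal p (a :: t)
    simp only [pvTotal]
    ring

-- ---- pvTotal recurrences ----
theorem pv_pd_append (p : List (Int × Int)) (b x : Int × Int) :
    pvPd (p ++ [b]) x = pvPd p x + pvPd [b] x := by
  simp [pvPd, List.filter_append]

theorem pv_total_shift (l p : List (Int × Int)) :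
    pvTotal p l = (l.map (fun b => pvPd p b)).sum + pvTotal [] l := by
  induction l generalizing p with
  | nil => simp [pvTotal]
  | cons a t ih =>
    have h1 := ih (p ++ [a])
    have h2 := ih [a]
    simp only [pvTotal, List.map_cons, List.sum_cons, List.nil_append]
    rw [h1, h2]
    have h3 : (t.map (fun b => pvPd (p ++ [a]) b)).sum
        = (t.map (fun b => pvPd p b)).sum + (t.map (fun b => pvPd [a] b)).sum := by
      rw [← PySem.List.sum_map_add_int]
      exact congrArg List.sum (List.map_congr_left (fun x _ => pv_pd_append p a x))
    rw [h3]
    have h0 : pvPd [] a = 0 := by simp [pvPd]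
    rw [h0]; ring

theorem pv_pd_singleton (a b : Int × Int) :
    pvPd [a] b = if b.2 != a.2 then b.1 - a.1 else 0 := by
  by_cases h : (b.2 != a.2) = true <;> simp [pvPd, h]

theorem pv_total_cons (a : Int × Int) (t : List (Int × Int)) :
    pvTotal [] (a :: t) = pvSd a t + pvSd a t + pvTotal [] t := by
  have h2 := pv_total_shift t [a]
  have hsum : (t.map (fun b => pvPd [a] b)).sum = pvSd a t := by
    have : (t.map (fun b => pvPd [a] b)).sum
        = (t.map (fun b => if a.2 != b.2 then b.1 - a.1 else 0)).sum := by
      refine congrArg List.sum (List.map_congr_left (fun x _ => ?_))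
      rw [pv_pd_singleton, bne_comm]
    rw [this, pv_sum_map_ite_filter t (fun b => a.2 != b.2) (fun b => b.1 - a.1)]
    rfl
  simp only [pvTotal, List.nil_append]
  rw [h2, hsum]
  have h0 : pvPd [] a = 0 := by simp [pvPd]
  rw [h0]; ring

-- ---- B's double-sum recurrence ----
theorem pv_inner_cons (x a : Int × Int) (t : List (Int × Int)) :
    pvInner x (a :: t) = (if x.2 != a.2 then |x.1 - a.1| else 0) + pvInner x t := by
  by_cases h : (x.2 != a.2) = true <;> simp [pvInner, h]

theorem pv_bsum2_cons (outer : List (Int × Int)) (a : Int × Int) (t : List (Int × Int)) :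
    pvBsum2 outer (a :: t)
      = (outer.map (fun x => if x.2 != a.2 then |x.1 - a.1| else 0)).sum + pvBsum2 outer t := by
  unfold pvBsum2
  rw [← PySem.List.sum_map_add_int]
  exact congrArg List.sum (List.map_congr_left (fun x _ => pv_inner_cons x a t))

theorem pv_bsum_cons (a : Int × Int) (t : List (Int × Int)) :
    pvBsum2 (a :: t) (a :: t) = pvInner a t + pvInner a t + pvBsum2 t t := by
  rw [pv_bsum2_cons]
  have h1 : (t.map (fun x => if x.2 != a.2 then |x.1 - a.1| else 0)).sum = pvInner a t := by
    rw [pv_sum_map_ite_filter t (fun x => x.2 != a.2) (fun x => |x.1 - a.1|)]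
    unfold pvInner
    rw [show (t.filter (fun x => x.2 != a.2)) = (t.filter (fun b => a.2 != b.2)) by
      exact List.filter_congr (fun x _ => by rw [bne_comm])]
    exact congrArg List.sum (List.map_congr_left (fun x _ => abs_sub_comm x.1 a.1))
  simp only [pvBsum2, List.map_cons, List.sum_cons]
  rw [h1]
  simp only [bne_self_eq_false, if_false, Bool.false_eq_true]
  ring

-- ---- sortedness bridge: A's telescoped total equals B's double sum on a sorted list ----
theorem pv_total_eq_bsum (l : List (Int × Int)) (hs : l.Pairwise (fun u v => u.1 ≤ v.1)) :
    pvTotal [] l = pvBsum2 l l := by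
  induction l with
  | nil => simp [pvTotal, pvBsum2]
  | cons a t ih =>
    rw [pv_total_cons, pv_bsum_cons, ih hs.of_cons]
    have : pvInner a t = pvSd a t := by
      unfold pvInner pvSd
      refine congrArg List.sum (List.map_congr_left (fun x hx => ?_))
      have hle : a.1 ≤ x.1 := (List.pairwise_cons.mp hs).1 x (List.mem_of_mem_filter hx)
      rw [abs_sub_comm]
      exact abs_of_nonneg (by linarith)
    rw [this]

-- sorted2 with key (fst, snd) yields a list nondecreasing in the first component
theorem pv_insertBy_fst (x : Int × Int) (ys : List (Int × Int))
    (h : ys.Pairwise (fun u v : Int × Int => u.1 ≤ v.1)) :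
    (PySem.List.insertBy
        (fun a b : Int × Int => decide (a.1 < b.1) || (!decide (b.1 < a.1) && decide (a.2 < b.2)))
        x ys).Pairwise (fun u v : Int × Int => u.1 ≤ v.1) := by
  induction ys with
  | nil => simp [PySem.List.insertBy]
  | cons y ys ih =>
    rw [PySem.List.insertBy]
    by_cases hb : (decide (x.1 < y.1) || (!decide (y.1 < x.1) && decide (x.2 < y.2))) = true
    · rw [if_pos hb]
      have hxy : x.1 ≤ y.1 := by
        rcases Bool.or_eq_true_iff.mp hb with h1 | h1
        · exact le_of_lt (of_decide_eq_true h1)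
        · have h2 := (Bool.and_eq_true_iff.mp h1).1
          have h3 : ¬ (y.1 < x.1) := by
            intro hlt
            simp [decide_eq_true hlt] at h2
          omega
      refine List.pairwise_cons.mpr ⟨?_, h⟩
      intro b hbmem
      rcases List.mem_cons.mp hbmem with rfl | hbmem
      · exact hxy
      · exact le_trans hxy ((List.pairwise_cons.mp h).1 b hbmem)
    · rw [if_neg hb]
      have hyx : y.1 ≤ x.1 := by
        have h1 : ¬ (x.1 < y.1) := by
          intro hlt
          exact hb (Bool.or_eq_true_iff.mpr (Or.inl (decide_eq_true hlt)))
        omega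
      refine List.pairwise_cons.mpr ⟨?_, ih (List.pairwise_cons.mp h).2⟩
      intro b hbmem
      rw [PySem.List.insertBy_mem_iff] at hbmem
      rcases hbmem with rfl | hbmem
      · exact hyx
      · exact (List.pairwise_cons.mp h).1 b hbmem

theorem pv_foldl_insertBy_pairwise (data acc : List (Int × Int))
    (hacc : acc.Pairwise (fun u v : Int × Int => u.1 ≤ v.1)) :
    (data.foldl (fun acc x => PySem.List.insertBy
        (fun a b : Int × Int => decide (a.1 < b.1) || (!decide (b.1 < a.1) && decide (a.2 < b.2)))
        x acc) acc).Pairwise (fun u v : Int × Int => u.1 ≤ v.1) := by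
  induction data generalizing acc with
  | nil => exact hacc
  | cons d ds ih => exact ih _ (pv_insertBy_fst d acc hacc)

theorem pv_sorted2_pairwise_fst (data : List (Int × Int)) :
    (PySem.List.sorted2 data Prod.fst Prod.snd).Pairwise (fun u v => u.1 ≤ v.1) := by
  exact pv_foldl_insertBy_pairwise data [] List.Pairwise.nil

-- ---- main equality ----
theorem pv_main (data : List (Int × Int)) : ex_dist data = ex_dist_alt data := by
  have hs := pv_sorted2_pairwise_fst data
  set s := PySem.List.sorted2 data Prod.fst Prod.snd with hsdef
  set r := s.foldl pvBody1 (PySem.Dict.empty, PySem.Dict.empty, 0) with hrdef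
  have hA : ex_dist data =
      ((PySem.List.pyRange 0 (PySem.List.len s)).foldl
        (fun st i => pvBody2 (PySem.List.len s) st (i, PySem.List.pyGetD s i (0, 0)))
        (0, r.2.1, r.1, 0, r.2.2)).1 := rfl
  have hB : ex_dist_alt data = pvBsum2 s s := by
    show (s.flatMap (fun a => (s.filter (fun b => a.2 != b.2)).map (fun b => |a.1 - b.1|))).sum = _
    rw [pv_sum_flatMap]
    rfl
  rw [hA, hB]
  have henum : (PySem.List.enumerate s).foldl (pvBody2 (PySem.List.len s)) (0, r.2.1, r.1, 0, r.2.2)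
      = (PySem.List.pyRange 0 (PySem.List.len s)).foldl
          (fun st i => pvBody2 (PySem.List.len s) st (i, PySem.List.pyGetD s i (0, 0)))
          (0, r.2.1, r.1, 0, r.2.2) := by
    rw [PySem.List.enumerate_eq_map_pyRange s ((0 : Int), (0 : Int)), List.foldl_map]
  rw [← henum]
  obtain ⟨h1, h2, h3⟩ := pv_loop1 s PySem.Dict.empty PySem.Dict.empty 0 (fun c => by simp)
  rw [← hrdef] at h1 h2 h3
  have hsufInv : ∀ c, r.1.getD c (0, 0) = (pvSumC s c, pvCntC s c) := by
    intro c
    rw [h1 c]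
    simp
  have hpreInv : ∀ c, r.2.1.getD c (0, 0) = (pvSumC ([] : List (Int × Int)) c, pvCntC ([] : List (Int × Int)) c) := by
    intro c
    rw [h2 c]
    simp [pvSumC, pvCntC]
  have hstot : r.2.2 = pvSumX s := by
    rw [h3]
    ring
  have hl2 := pv_loop2 (PySem.List.len s) s [] 0 r.2.1 r.1 hpreInv hsufInv
    (by simp [PySem.List.len])
  have h0 : pvSumX ([] : List (Int × Int)) = 0 := by simp [pvSumX]
  rw [h0] at hl2
  simp only [List.length_nil, Nat.cast_zero] at hl2
  rw [hstot]
  rw [hl2, zero_add]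
  exact pv_total_eq_bsum s hs

-- ===== VERDICT (by name: the statement is the Claim_ definition above) =====
theorem ex_dist_spec : Claim_equal_ex_dist := by
  intro data _
  exact pv_main data
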